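-- pv_equiv track=rewrite | github.com/madsthoisen/advent_of_code | 2020/dec18/solution.py | return_parens
-- ===== SOURCE A (Python) =====
-- def return_parens(expr):
--     bal = 0
--     start = -1
--     for i, char in enumerate(expr):
--         if char == '(':
--             bal += 1
--             if start == -1:
--                 start = i
--         if char == ')':
--             bal -= 1
--             if bal == 0:
--                 return True, expr[start:i + 1]
--     return False, None
-- ===== SOURCE B (Python) =====
-- def return_parens(expr):
--     # Two-pass: precompute the prefix-balance table and the fixed start index,
--     # then scan the table for the first closing paren at balance zero.
--     bals = []
--     b = 0
--     for c in expr: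
--         b += (c == '(') - (c == ')')
--         bals.append(b)
--     start = expr.find('(')
--     for i, (c, b) in enumerate(zip(expr, bals)):
--         if c == ')' and b == 0:
--             return True, expr[start:i + 1]
--     return False, None
-- ===== Notes on version B (the rewrite author's own statement) =====
-- stated objective: alternative
-- what changed: Replaces A's single stateful scan (running balance plus mutable start sentinel) by a two-pass decomposition: precompute the full prefix-balance table and the fixed start index via str.find, then scan the table for the first closing parenthesis at balance zero.
import Mathlib
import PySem

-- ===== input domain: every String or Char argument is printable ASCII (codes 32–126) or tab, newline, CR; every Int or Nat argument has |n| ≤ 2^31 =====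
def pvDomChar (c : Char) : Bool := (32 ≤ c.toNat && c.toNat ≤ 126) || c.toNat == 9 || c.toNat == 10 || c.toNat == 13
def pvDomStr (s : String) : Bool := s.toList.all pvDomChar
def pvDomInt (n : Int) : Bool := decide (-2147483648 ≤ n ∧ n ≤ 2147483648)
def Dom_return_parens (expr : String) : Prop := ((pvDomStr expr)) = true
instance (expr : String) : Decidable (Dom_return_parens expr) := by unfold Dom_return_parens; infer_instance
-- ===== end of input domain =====

-- B replaces A's stateful single scan by a precomputed prefix-balance table, a fixed
-- str.find start index and a table scan (alternative decomposition; same return value).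

-- ===== PORT A =====
def pvALoop (expr : String) : List Char → Int → Int → Nat → Bool × Option String
  | [], _, _, _ => (false, none)
  | ch :: rest, bal, start, i =>
    let bal1 := if ch = '(' then bal + 1 else bal
    let start1 := if ch = '(' then (if start = -1 then (i : Int) else start) else start
    let bal2 := if ch = ')' then bal1 - 1 else bal1
    if ch = ')' ∧ bal2 = 0 then
      (true, some (PySem.Str.slice expr (some start1) (some ((i : Int) + 1))))
    else
      pvALoop expr rest bal2 start1 (i + 1)

def return_parens (expr : String) : Bool × Option String :=
  pvALoop expr expr.toList 0 (-1) 0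

-- ===== PORT B =====
def pvBals : List Char → Int → List Int
  | [], _ => []
  | c :: rest, b =>
    let b' := b + (if c = '(' then 1 else 0) - (if c = ')' then 1 else 0)
    b' :: pvBals rest b'

def pvBScan (expr : String) (start : Int) : List (Char × Int) → Nat → Bool × Option String
  | [], _ => (false, none)
  | (c, b) :: rest, i =>
    if c = ')' ∧ b = 0 then
      (true, some (PySem.Str.slice expr (some start) (some ((i : Int) + 1))))
    else pvBScan expr start rest (i + 1)

def return_parens_alt (expr : String) : Bool × Option String :=
  let cs := expr.toList
  pvBScan expr (PySem.Str.find expr "(") (cs.zip (pvBals cs 0)) 0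

-- ===== PRECONDITION & SPEC =====
def Spec_return_parens (expr : String) (out : Bool × Option String) : Prop := out = return_parens_alt expr
instance (expr : String) (out : Bool × Option String) : Decidable (Spec_return_parens expr out) := by unfold Spec_return_parens; infer_instance

-- ===== CLAIM (what is proved, stated in full; the proofs are below) =====
def Claim_equal_return_parens : Prop := ∀ (expr : String), Dom_return_parens expr → Spec_return_parens expr (return_parens expr)

-- ===== LEMMAS AND PROOFS =====

/-- Index of the first `'('` in a list, if any. -/
def pvFirstLP : List Char → Option Nat
  | [] => none
  | c :: rest => if c = '(' then some 0 else (pvFirstLP rest).map (· + 1)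

theorem pvFindGo_eq (cs : List Char) (k j : Nat) (h : pvFirstLP cs = some j) :
    PySem.Chars.find.go ['('] cs k = ((k + j : Nat) : Int) := by
  induction cs generalizing k j with
  | nil => simp [pvFirstLP] at h
  | cons c rest ih =>
    by_cases hc : c = '('
    · subst hc
      simp [pvFirstLP] at h
      subst h
      simp [PySem.Chars.find.go, List.isPrefixOf]
    · have hc' : ¬ ('(' = c) := fun h' => hc h'.symm
      simp [pvFirstLP, hc] at h
      obtain ⟨j', hj', rfl⟩ := h
      rw [show PySem.Chars.find.go ['('] (c :: rest) k
            = PySem.Chars.find.go ['('] rest (k + 1) from by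
          simp [PySem.Chars.find.go, List.isPrefixOf, hc'],
        ih (k + 1) j' hj']
      push_cast
      omega

/-- After the first `'('` has been seen, A's start register is fixed and equals B's. -/
theorem pvSeen (expr : String) (cs : List Char) (b s : Int) (i : Nat) (hs : s ≠ -1) :
    pvALoop expr cs b s i = pvBScan expr s (cs.zip (pvBals cs b)) i := by
  induction cs generalizing b i with
  | nil => simp [pvALoop, pvBals, pvBScan]
  | cons c rest ih =>
    by_cases hc : c = '('
    · subst hc
      simp [pvALoop, pvBals, pvBScan, hs]
      exact ih (b + 1) (i + 1)
    · by_cases hc2 : c = ')'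
      · subst hc2
        by_cases hb : b - 1 = 0
        · simp [pvALoop, pvBals, pvBScan, hb]
        · simp [pvALoop, pvBals, pvBScan, hb]
          exact ih (b - 1) (i + 1)
      · simp [pvALoop, pvBals, pvBScan, hc, hc2]
        exact ih b (i + 1)

/-- Before any `'('`, A's balance is ≤ 0, no return fires, and both sides agree for any
    start value that matches the first `'('` position when one exists. -/
theorem pvUnseen (expr : String) (cs : List Char) (b : Int) (i : Nat) (s : Int)
    (hb : b ≤ 0) (hstart : ∀ j, pvFirstLP cs = some j → s = (i : Int) + j) :
    pvALoop expr cs b (-1) i = pvBScan expr s (cs.zip (pvBals cs b)) i := by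
  induction cs generalizing b i with
  | nil => simp [pvALoop, pvBals, pvBScan]
  | cons c rest ih =>
    by_cases hc : c = '('
    · subst hc
      have hsi : s = (i : Int) := by
        have := hstart 0 (by simp [pvFirstLP])
        simpa using this
      subst hsi
      simp [pvALoop, pvBals, pvBScan]
      exact pvSeen expr rest (b + 1) _ (i + 1) (by omega)
    · by_cases hc2 : c = ')'
      · subst hc2
        have hb1 : ¬ (b - 1 = 0) := by omega
        simp [pvALoop, pvBals, pvBScan, hb1]
        exact ih (b - 1) (i + 1) (by omega)
          (fun j hj => by
            have := hstart (j + 1) (by simp [pvFirstLP, hj])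
            push_cast at this ⊢
            omega)
      · simp [pvALoop, pvBals, pvBScan, hc, hc2]
        exact ih b (i + 1) hb
          (fun j hj => by
            have := hstart (j + 1) (by simp [pvFirstLP, hc, hj])
            push_cast at this ⊢
            omega)

-- ===== VERDICT (by name: the statement is the Claim_ definition above) =====
theorem return_parens_spec : Claim_equal_return_parens := by
  unfold Claim_equal_return_parens
  intro expr _
  unfold Spec_return_parens return_parens return_parens_alt
  apply pvUnseen expr expr.toList 0 0 _ le_rfl
  intro j hj
  have : PySem.Str.find expr "(" = PySem.Chars.find.go ['('] expr.toList 0 := by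
    simp [PySem.Str.find, PySem.Chars.find]
  rw [this, pvFindGo_eq expr.toList 0 j hj]
  push_cast
  omega
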